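-- pv_equiv track=rewrite | github.com/vinc395/gwas-human2mouse | scripts/run_pipeline.py | make_unique_fieldnames
-- ===== SOURCE A (Python) =====
-- from typing import Dict, Iterable, Iterator, List, Optional, Tuple
--
-- def make_unique_fieldnames(fieldnames: List[object]) -> List[str]:
--     seen: Dict[str, int] = {}
--     cleaned: List[str] = []
--     for idx, field in enumerate(fieldnames):
--         base = str(field or '').strip().strip('"').strip("'")
--         if not base:
--             base = f'column_{idx + 1}'
--         seen[base] = seen.get(base, 0) + 1
--         if seen[base] > 1:
--             cleaned.append(f'{base}__{seen[base]}')
--         else: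
--             cleaned.append(base)
--     return cleaned
-- ===== SOURCE B (Python) =====
-- from typing import List
--
--
-- def make_unique_fieldnames(fieldnames: List[object]) -> List[str]:
--     # Phase 1: clean every field into its base name.
--     bases: List[str] = []
--     for idx, field in enumerate(fieldnames):
--         base = str(field or '').strip().strip('"').strip("'")
--         bases.append(base if base else f'column_{idx + 1}')
--     # Phase 2: group positions by base.
--     buckets = {}
--     for pos, base in enumerate(bases):
--         buckets.setdefault(base, []).append(pos)
--     # Phase 3: fill the result, one bucket at a time.
--     result: List[str] = [''] * len(bases)
--     for base, positions in buckets.items():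
--         result[positions[0]] = base
--         for j, pos in enumerate(positions[1:], start=2):
--             result[pos] = f'{base}__{j}'
--     return result
-- ===== Notes on version B (the rewrite author's own statement) =====
-- stated objective: alternative
-- what changed: Replaces A's single pass with a running seen-counter dict by a three-phase group-by decomposition: compute all cleaned bases first, group positions per base into a dict of buckets, then fill a preallocated result list bucket by bucket (bare base at the first position, base__j for later ones).
import Mathlib
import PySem

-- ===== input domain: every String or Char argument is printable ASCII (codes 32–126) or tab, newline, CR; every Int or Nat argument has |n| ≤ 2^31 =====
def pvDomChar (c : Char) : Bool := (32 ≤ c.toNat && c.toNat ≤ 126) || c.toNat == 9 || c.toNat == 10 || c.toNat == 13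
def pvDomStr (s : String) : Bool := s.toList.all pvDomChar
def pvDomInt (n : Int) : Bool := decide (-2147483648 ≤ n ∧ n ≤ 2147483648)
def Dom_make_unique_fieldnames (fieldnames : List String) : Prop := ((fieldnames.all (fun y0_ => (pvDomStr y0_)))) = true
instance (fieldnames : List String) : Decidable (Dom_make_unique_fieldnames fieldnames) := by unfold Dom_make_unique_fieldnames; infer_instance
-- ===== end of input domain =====

-- B replaces A's single pass with a running seen-counter dict by a three-phase group-by
-- decomposition (clean all bases, bucket positions per base, fill a preallocated result);
-- alternative structure, same cost.

-- ===== PORT A =====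
-- shared cleaning chain, identical in both Pythons:
-- str(field or '').strip().strip('"').strip("'") with the f'column_{idx + 1}' fallback
-- ('field or …' is just 'field' for a str argument: the empty string is falsy and maps
-- to '' anyway, and str() of a str is itself).
def pvClean (field : String) (idx : Int) : String :=
  let base := PySem.Str.stripChars (PySem.Str.stripChars (PySem.Str.strip field) "\"") "'"
  if base = "" then "column_" ++ PySem.Int.toStr (idx + 1) else base

-- A's loop body: bump seen[base] (seen[base] = seen.get(base, 0) + 1, read back as getD —
-- the key was just inserted, so Python's seen[base] cannot raise), append the name.
def pvStepA (st : PySem.Dict String Int × List String) (p : Int × String) :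
    PySem.Dict String Int × List String :=
  let base := pvClean p.2 p.1
  let seen := st.1.insert base (st.1.getD base 0 + 1)
  if seen.getD base 0 > 1 then
    (seen, st.2 ++ [base ++ "__" ++ PySem.Int.toStr (seen.getD base 0)])
  else
    (seen, st.2 ++ [base])

def make_unique_fieldnames (fieldnames : List String) : List String :=
  ((PySem.List.enumerate fieldnames 0).foldl pvStepA (PySem.Dict.empty, [])).2

-- ===== PORT B =====
-- phase-2 loop body: buckets.setdefault(base, []).append(pos)
def pvStepB (d : PySem.Dict String (List Int)) (p : Int × String) :
    PySem.Dict String (List Int) :=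
  d.modify p.2 [] (· ++ [p.1])

-- phase-3 loop body: result[positions[0]] = base; result[pos] = f'{base}__{j}' for the
-- rest (the [] arm is unreachable: buckets never hold an empty position list).
def pvFill (res : List String) (item : String × List Int) : List String :=
  match item.2 with
  | [] => res
  | p0 :: rest =>
    (PySem.List.enumerate rest 2).foldl
      (fun r q => PySem.List.pySetD r q.2 (item.1 ++ "__" ++ PySem.Int.toStr q.1))
      (PySem.List.pySetD res p0 item.1)

def make_unique_fieldnames_alt (fieldnames : List String) : List String :=
  -- Phase 1: clean every field into its base name.
  let bases := (PySem.List.enumerate fieldnames 0).map (fun p => pvClean p.2 p.1)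
  -- Phase 2: group positions by base.
  let buckets := (PySem.List.enumerate bases 0).foldl pvStepB PySem.Dict.empty
  -- Phase 3: fill the result, one bucket at a time.
  let init : List String := List.replicate bases.length ""
  buckets.items.foldl pvFill init

-- ===== PRECONDITION & SPEC =====
def Spec_make_unique_fieldnames (fieldnames : List String) (out : List String) : Prop := out = make_unique_fieldnames_alt fieldnames
instance (fieldnames : List String) (out : List String) : Decidable (Spec_make_unique_fieldnames fieldnames out) := by unfold Spec_make_unique_fieldnames; infer_instance

-- ===== CLAIM (what is proved, stated in full; the proofs are below) =====
def Claim_equal_make_unique_fieldnames : Prop := ∀ (fieldnames : List String), Dom_make_unique_fieldnames fieldnames → Spec_make_unique_fieldnames fieldnames (make_unique_fieldnames fieldnames)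

-- ===== LEMMAS AND PROOFS =====

-- The common reference: the name emitted for base `b` after the bases `done` were emitted.
def pvName (done : List String) (b : String) : String :=
  if done.count b = 0 then b else b ++ "__" ++ PySem.Int.toStr ((done.count b : Int) + 1)

-- Reference in A's shape: clean on the fly, carry the emitted bases.
def pvBuild (done : List String) (s : Int) : List String → List String
  | [] => []
  | f :: fs => pvName done (pvClean f s) :: pvBuild (done ++ [pvClean f s]) (s + 1) fs

-- Reference in B's shape: over pre-cleaned bases.
def pvBuild2 (done : List String) : List String → List String
  | [] => []
  | b :: bs => pvName done b :: pvBuild2 (done ++ [b]) bs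

def pvCleanList (s : Int) : List String → List String
  | [] => []
  | f :: fs => pvClean f s :: pvCleanList (s + 1) fs

-- the (natural-number, resp. integer) positions at which base b occurs in bases
def pvPosN (bases : List String) (b : String) : List Nat :=
  (List.range bases.length).filter (fun j => bases[j]? == some b)
def pvPos (bases : List String) (b : String) : List Int :=
  (pvPosN bases b).map (fun (j : Nat) => (j : Int))

-- ---------- A-side ----------
lemma pvStepA_eq (d : PySem.Dict String Int) (acc : List String) (s : Int) (f : String)
    (done : List String) (h : ∀ b, d.getD b 0 = (done.count b : Int)) :
    pvStepA (d, acc) (s, f) =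
      (d.insert (pvClean f s) ((done.count (pvClean f s) : Int) + 1),
       acc ++ [pvName done (pvClean f s)]) := by
  generalize hb : pvClean f s = base
  simp only [pvStepA, hb, h, PySem.Dict.getD_insert_self, pvName]
  by_cases hc : done.count base = 0
  · rw [if_neg (by rw [hc]; norm_num), if_pos hc]
  · rw [if_pos (by omega), if_neg hc]

lemma pvA_loop (fs : List String) : ∀ (s : Int) (d : PySem.Dict String Int)
    (acc done : List String), (∀ b, d.getD b 0 = (done.count b : Int)) →
    ((PySem.List.enumerate fs s).foldl pvStepA (d, acc)).2 = acc ++ pvBuild done s fs := by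
  induction fs with
  | nil => intro s d acc done h; simp [PySem.List.enumerate_nil, pvBuild]
  | cons f fs ih =>
    intro s d acc done h
    rw [PySem.List.enumerate_cons, List.foldl_cons, pvStepA_eq d acc s f done h, pvBuild]
    have hinv : ∀ b, (d.insert (pvClean f s) ((done.count (pvClean f s) : Int) + 1)).getD b 0
        = ((done ++ [pvClean f s]).count b : Int) := by
      intro b
      rw [PySem.Dict.getD_insert]
      by_cases hb : b = pvClean f s
      · rw [if_pos hb, hb]; simp [List.count_append]
      · rw [if_neg hb, h]
        simp [List.count_append, Ne.symm hb]
    rw [ih _ _ _ (done ++ [pvClean f s]) hinv]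
    simp

lemma pvA_eq (fs : List String) : make_unique_fieldnames fs = pvBuild [] 0 fs := by
  rw [make_unique_fieldnames,
    pvA_loop fs 0 PySem.Dict.empty [] [] (fun b => by simp [PySem.Dict.getD_empty])]
  simp

-- ---------- bridging the two reference shapes ----------
lemma pvCleanList_eq (fs : List String) : ∀ s : Int,
    (PySem.List.enumerate fs s).map (fun p => pvClean p.2 p.1) = pvCleanList s fs := by
  induction fs with
  | nil => intro s; simp [PySem.List.enumerate_nil, pvCleanList]
  | cons f fs ih => intro s; simp [PySem.List.enumerate_cons, pvCleanList, ih]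

lemma pvBuild_eq_build2 (fs : List String) : ∀ (done : List String) (s : Int),
    pvBuild done s fs = pvBuild2 done (pvCleanList s fs) := by
  induction fs with
  | nil => intro done s; simp [pvBuild, pvCleanList, pvBuild2]
  | cons f fs ih => intro done s; simp [pvBuild, pvCleanList, pvBuild2, ih]

lemma pvBuild2_length (bs : List String) : ∀ done, (pvBuild2 done bs).length = bs.length := by
  induction bs with
  | nil => intro done; simp [pvBuild2]
  | cons b bs ih => intro done; simp [pvBuild2, ih]

lemma pvBuild2_getElem? (bs : List String) : ∀ (done : List String) (i : Nat), i < bs.length →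
    (pvBuild2 done bs)[i]? = (bs[i]?).map (fun b => pvName (done ++ bs.take i) b) := by
  induction bs with
  | nil => intro done i h; simp at h
  | cons b bs ih =>
    intro done i h
    cases i with
    | zero => simp [pvBuild2]
    | succ i =>
      simp only [pvBuild2, List.getElem?_cons_succ, List.take_succ_cons]
      rw [ih (done ++ [b]) i (by simpa using h)]
      simp

-- ---------- position lists ----------
lemma pvPosN_mem (bases : List String) (b : String) (j : Nat) :
    j ∈ pvPosN bases b ↔ bases[j]? = some b := by
  simp only [pvPosN, List.mem_filter, List.mem_range, beq_iff_eq]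
  exact ⟨fun h => h.2, fun h => ⟨(List.getElem?_eq_some_iff.mp h).1, h⟩⟩

lemma pvPosN_nodup (bases : List String) (b : String) : (pvPosN bases b).Nodup :=
  List.nodup_range.filter _

lemma pvPosN_cons (x : String) (xs : List String) (b : String) :
    pvPosN (x :: xs) b =
      (if x = b then [0] else []) ++ (pvPosN xs b).map (· + 1) := by
  simp only [pvPosN, List.length_cons, List.range_succ_eq_map]
  rw [List.filter_cons]
  simp only [List.getElem?_cons_zero, List.filter_map]
  by_cases hx : x = b
  · simp [hx, Function.comp_def]
  · simp [hx, Function.comp_def]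

lemma pvEnumFilter (bases : List String) : ∀ (s : Nat) (b : String),
    ((PySem.List.enumerate bases (s : Int)).filter (fun p => p.2 == b)).map (·.1)
      = (pvPosN bases b).map (fun j => ((s + j : Nat) : Int)) := by
  induction bases with
  | nil => intro s b; simp [PySem.List.enumerate_nil, pvPosN]
  | cons x xs ih =>
    intro s b
    have hcast : (s : Int) + 1 = ((s + 1 : Nat) : Int) := by push_cast; ring
    rw [PySem.List.enumerate_cons, List.filter_cons, pvPosN_cons]
    by_cases hx : x = b
    · have hxb : (((s : Int), x).2 == b) = true := by simp [hx]
      rw [if_pos hxb, if_pos hx, List.map_cons, hcast, ih (s + 1) b]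
      simp only [List.singleton_append, List.map_cons, List.map_map, Function.comp_def]
      congr 1
      exact List.map_congr_left (fun a ha => by omega)
    · have hxb : (((s : Int), x).2 == b) = false := by simp [hx]
      rw [if_neg (by simp [hxb]), if_neg hx, hcast, ih (s + 1) b]
      simp only [List.nil_append, List.map_map, Function.comp_def]
      exact List.map_congr_left (fun a ha => by omega)

lemma pvCount_take (bases : List String) (b : String) : ∀ i : Nat, i ≤ bases.length →
    ((List.range i).filter (fun j => bases[j]? == some b)).length = (bases.take i).count b := by
  intro i
  induction i with
  | zero => intro _; simp
  | succ i ih =>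
    intro hi
    have hlt : i < bases.length := by omega
    rw [List.range_succ, List.filter_append, List.length_append, ih (by omega)]
    rw [List.take_add_one, List.getElem?_eq_getElem hlt]
    simp only [List.filter_cons, List.filter_nil, List.count_append]
    by_cases hb : bases[i] = b
    · simp [List.getElem?_eq_getElem hlt, hb]
    · simp [List.getElem?_eq_getElem hlt, hb]

lemma pvPosN_index? (bases : List String) (b : String) (i : Nat) (h : bases[i]? = some b) :
    PySem.List.index? (pvPosN bases b) i = some ((bases.take i).count b) := by
  have hi : i < bases.length := (List.getElem?_eq_some_iff.mp h).1
  have hfil : pvPosN bases b = ((List.range i).filter (fun j => bases[j]? == some b))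
      ++ i :: ((List.range (bases.length - (i+1))).map ((i+1) + ·)).filter
          (fun j => bases[j]? == some b) := by
    rw [pvPosN]
    conv_lhs => rw [show bases.length = (i+1) + (bases.length - (i+1)) by omega]
    rw [List.range_add, List.range_succ, List.filter_append, List.filter_append]
    simp [h]
  rw [hfil, PySem.List.index?_eq_some_iff]
  refine ⟨(List.range i).filter (fun j => bases[j]? == some b), _, rfl,
    pvCount_take bases b i (by omega), ?_⟩
  intro hmem
  have := List.mem_range.mp (List.mem_filter.mp hmem).1
  omega

lemma pvIndex?_map_cast (l : List Nat) (i : Nat) :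
    PySem.List.index? (l.map (fun (j : Nat) => (j : Int))) ((i : Nat) : Int)
      = PySem.List.index? l i := by
  induction l with
  | nil => simp [PySem.List.index?]
  | cons x xs ih =>
    rw [List.map_cons]
    by_cases hx : x = i
    · subst hx; rw [PySem.List.index?_cons_self, PySem.List.index?_cons_self]
    · rw [PySem.List.index?_cons_of_ne (xs.map (fun (j : Nat) => (j : Int)))
          (fun h => hx (Nat.cast_injective h)),
        PySem.List.index?_cons_of_ne xs hx, ih]

lemma pvPos_nodup (bases : List String) (b : String) : (pvPos bases b).Nodup :=
  (pvPosN_nodup bases b).map (fun _ _ h => Nat.cast_injective h)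

lemma pvPos_nonneg (bases : List String) (b : String) : ∀ p ∈ pvPos bases b, 0 ≤ p := by
  intro p hp
  obtain ⟨j, _, rfl⟩ := List.mem_map.mp hp
  exact Int.natCast_nonneg j

lemma pvPos_not_mem (bases : List String) (b : String) (i : Nat) (h : bases[i]? ≠ some b) :
    ((i : Nat) : Int) ∉ pvPos bases b := by
  intro hmem
  obtain ⟨j, hj, hji⟩ := List.mem_map.mp hmem
  have : j = i := Nat.cast_injective hji
  subst this
  exact h ((pvPosN_mem bases b j).mp hj)

lemma pvIndex?_cons_some_zero (p : Int) (ps : List Int) (v : Int)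
    (h : PySem.List.index? (p :: ps) v = some 0) : p = v := by
  by_cases hp : p = v
  · exact hp
  · rw [PySem.List.index?_cons_of_ne ps hp] at h
    cases hx : PySem.List.index? ps v <;> rw [hx] at h <;> simp at h

-- ---------- B phase 2: the buckets dict ----------
def pvBuckets (bases : List String) : PySem.Dict String (List Int) :=
  (PySem.List.enumerate bases 0).foldl pvStepB PySem.Dict.empty

lemma pvBuckets_getD (bases : List String) (b : String) :
    (pvBuckets bases).getD b [] = pvPos bases b := by
  have hfold : pvBuckets bases =
      ((PySem.List.enumerate bases 0).map (fun p => (p.2, p.1))).foldl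
        (fun d p => d.modify p.1 [] (· ++ [p.2])) PySem.Dict.empty := by
    rw [List.foldl_map]; rfl
  rw [hfold, PySem.Dict.getD_foldl_modify_append, PySem.Dict.getD_empty]
  rw [List.filter_map, List.map_map]
  have h1 : ((PySem.List.enumerate bases 0).filter (fun p => p.2 == b)).map (·.1)
      = (pvPosN bases b).map (fun j => ((0 + j : Nat) : Int)) := by
    have h0 : (0 : Int) = ((0 : Nat) : Int) := rfl
    rw [h0, pvEnumFilter bases 0 b]
  simp only [Function.comp_def] at h1 ⊢
  rw [List.nil_append]
  rw [show (fun (p : Int × String) => ((p.2, p.1).1 == b)) = (fun p => p.2 == b) from rfl]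
  rw [show (fun (x : Int × String) => (x.2, x.1).2) = (fun x => x.1) from rfl]
  rw [h1, pvPos]
  exact List.map_congr_left (fun a _ => by norm_num)

lemma pvBuckets_keys_nodup (bases : List String) : (pvBuckets bases).keys.Nodup := by
  have hfold : pvBuckets bases = (PySem.List.enumerate bases 0).foldl
      (fun d (p : Int × String) => d.modify p.2 [] (· ++ [p.1])) PySem.Dict.empty := rfl
  rw [hfold]
  exact PySem.Dict.nodup_keys_foldl_modify_key (PySem.List.enumerate bases 0)
    (fun (p : Int × String) => p.2) [] (fun d (p : Int × String) => (· ++ [p.1]))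
    PySem.Dict.empty (by rw [PySem.Dict.keys_empty]; exact List.nodup_nil)

lemma pvBuckets_mem_keys (bases : List String) (b : String) :
    b ∈ (pvBuckets bases).keys ↔ b ∈ bases := by
  have hfold : pvBuckets bases = (PySem.List.enumerate bases 0).foldl
      (fun d (p : Int × String) => d.modify p.2 [] (· ++ [p.1])) PySem.Dict.empty := rfl
  rw [hfold]
  rw [PySem.Dict.keys_foldl_modify_key (PySem.List.enumerate bases 0)
    (fun (p : Int × String) => p.2) [] (fun d (p : Int × String) => (· ++ [p.1]))
    PySem.Dict.empty]
  rw [PySem.List.map_snd_enumerate, PySem.Dict.keys_empty]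
  have h2 : PySem.Set.update ([] : List String) bases = PySem.Set.ofList bases := rfl
  rw [h2]
  exact PySem.Set.mem_ofList bases b

lemma pvBuckets_items (bases : List String) :
    (pvBuckets bases).items = (pvBuckets bases).keys.map (fun k => (k, pvPos bases k)) := by
  rw [PySem.Dict.items_eq_map_keys (pvBuckets bases) (pvBuckets_keys_nodup bases) []]
  exact List.map_congr_left (fun k _ => by rw [pvBuckets_getD])

-- ---------- B phase 3: the fill loops ----------
lemma pvSetD_getElem?_ne (res : List String) (p : Int) (v : String) (i : Nat)
    (hp : 0 ≤ p) (hne : p ≠ (i : Int)) :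
    (PySem.List.pySetD res p v)[i]? = res[i]? := by
  rw [PySem.List.pySetD_of_nonneg res v hp]
  apply List.getElem?_set_ne
  omega

lemma pvSetFold_length (pref : String) (ps : List Int) : ∀ (s : Int) (res : List String),
    ((PySem.List.enumerate ps s).foldl
      (fun r q => PySem.List.pySetD r q.2 (pref ++ "__" ++ PySem.Int.toStr q.1)) res).length
      = res.length := by
  induction ps with
  | nil => intro s res; simp [PySem.List.enumerate_nil]
  | cons p ps ih =>
    intro s res
    rw [PySem.List.enumerate_cons, List.foldl_cons, ih]
    exact PySem.List.length_pySetD res p _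

lemma pvSetFold_getElem? (pref : String) : ∀ (ps : List Int) (s : Int) (res : List String)
    (i : Nat), ps.Nodup → (∀ p ∈ ps, 0 ≤ p) →
    ((PySem.List.enumerate ps s).foldl
      (fun r q => PySem.List.pySetD r q.2 (pref ++ "__" ++ PySem.Int.toStr q.1)) res)[i]? =
      (match PySem.List.index? ps (i : Int) with
      | some k => res[i]?.map (fun _ => pref ++ "__" ++ PySem.Int.toStr (s + k))
      | none => res[i]?) := by
  intro ps
  induction ps with
  | nil => intro s res i _ _; simp [PySem.List.enumerate_nil, PySem.List.index?]
  | cons p ps ih =>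
    intro s res i hnd hpos
    rw [PySem.List.enumerate_cons, List.foldl_cons]
    have hnd' : ps.Nodup := hnd.of_cons
    have hpos' : ∀ q ∈ ps, 0 ≤ q := fun q hq => hpos q (List.mem_cons_of_mem _ hq)
    rw [ih (s + 1) _ i hnd' hpos']
    by_cases hp : p = (i : Int)
    · have hnotmem : (i : Int) ∉ ps := by
        rw [← hp]; exact (List.nodup_cons.mp hnd).1
      rw [(PySem.List.index?_eq_none_iff ps ((i : Int))).mpr hnotmem]
      rw [hp, PySem.List.index?_cons_self]
      rw [PySem.List.pySetD_of_nonneg res _ (by omega)]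
      have ht : ((i : Int)).toNat = i := by omega
      rw [ht, List.getElem?_set_self']
      simp
      cases res[i]? <;> rfl
    · rw [PySem.List.index?_cons_of_ne ps hp,
        pvSetD_getElem?_ne res p _ i (hpos p List.mem_cons_self) hp]
      cases h : PySem.List.index? ps (i : Int) with
      | none => simp
      | some k =>
        simp only [Option.map_some]
        have h2 : s + 1 + (k : Int) = s + ((k + 1 : Nat) : Int) := by push_cast; ring
        rw [h2]

lemma pvFill_length (res : List String) (item : String × List Int) :
    (pvFill res item).length = res.length := by
  obtain ⟨k, ps⟩ := item
  cases ps with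
  | nil => rfl
  | cons p0 rest =>
    show ((PySem.List.enumerate rest 2).foldl
      (fun r q => PySem.List.pySetD r q.2 (k ++ "__" ++ PySem.Int.toStr q.1))
      (PySem.List.pySetD res p0 k)).length = res.length
    rw [pvSetFold_length]
    exact PySem.List.length_pySetD res p0 k

lemma pvFill_getElem? (bases : List String) (i : Nat) (b : String) (hib : bases[i]? = some b)
    (k : String) (res : List String) (hlen : i < res.length) :
    (pvFill res (k, pvPos bases k))[i]? =
      if k = b then some (pvName (bases.take i) b) else res[i]? := by
  by_cases hk : k = b
  · subst hk
    have hi_mem : (i : Nat) ∈ pvPosN bases k := (pvPosN_mem bases k i).mpr hib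
    have hidx : PySem.List.index? (pvPos bases k) ((i : Nat) : Int)
        = some ((bases.take i).count k) := by
      rw [pvPos, pvIndex?_map_cast, pvPosN_index? bases k i hib]
    rw [if_pos rfl]
    cases hps : pvPos bases k with
    | nil =>
      exfalso
      have hm : ((i : Nat) : Int) ∈ pvPos bases k := List.mem_map.mpr ⟨i, hi_mem, rfl⟩
      rw [hps] at hm; exact List.not_mem_nil hm
    | cons p0 rest =>
      have hnd : (p0 :: rest).Nodup := by rw [← hps]; exact pvPos_nodup bases k
      have hnn : ∀ p ∈ p0 :: rest, 0 ≤ p := by rw [← hps]; exact pvPos_nonneg bases k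
      rw [hps] at hidx
      show ((PySem.List.enumerate rest 2).foldl
        (fun r q => PySem.List.pySetD r q.2 (k ++ "__" ++ PySem.Int.toStr q.1))
        (PySem.List.pySetD res p0 k))[i]? = some (pvName (bases.take i) k)
      rw [pvSetFold_getElem? k rest 2 _ i hnd.of_cons
        (fun p hp => hnn p (List.mem_cons_of_mem _ hp))]
      by_cases hc : (bases.take i).count k = 0
      · have hp0 : p0 = ((i : Nat) : Int) := by
          apply pvIndex?_cons_some_zero p0 rest
          rw [hidx, hc]
        have hnotmem : ((i : Nat) : Int) ∉ rest := by
          rw [← hp0]; exact (List.nodup_cons.mp hnd).1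
        rw [(PySem.List.index?_eq_none_iff rest _).mpr hnotmem]
        rw [hp0, PySem.List.pySetD_of_nonneg res k (by omega)]
        have ht : ((i : Nat) : Int).toNat = i := by omega
        rw [ht, List.getElem?_set_self', List.getElem?_eq_getElem hlen]
        simp [pvName, hc]
      · obtain ⟨c', hc'⟩ : ∃ c', (bases.take i).count k = c' + 1 :=
          ⟨(bases.take i).count k - 1, by omega⟩
        have hp0 : p0 ≠ ((i : Nat) : Int) := by
          intro hp0
          rw [← hp0, PySem.List.index?_cons_self] at hidx
          simp at hidx; omega
        have hrest : PySem.List.index? rest ((i : Nat) : Int) = some c' := by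
          rw [PySem.List.index?_cons_of_ne rest hp0] at hidx
          cases hx : PySem.List.index? rest ((i : Nat) : Int) with
          | none => rw [hx] at hidx; simp at hidx
          | some v =>
            rw [hx] at hidx
            simp only [Option.map_some, Option.some.injEq] at hidx
            rw [hc'] at hidx
            simp only [Option.some.injEq]
            omega
        rw [hrest]
        rw [pvSetD_getElem?_ne res p0 k i (hnn p0 List.mem_cons_self) hp0]
        rw [List.getElem?_eq_getElem hlen]
        simp only [Option.map_some]
        rw [pvName, if_neg (by omega)]
        congr 3
        rw [hc']
        push_cast
        ring
  · rw [if_neg hk]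
    have hnot : ((i : Nat) : Int) ∉ pvPos bases k :=
      pvPos_not_mem bases k i (by rw [hib]; intro h; exact hk (Option.some.inj h).symm)
    cases hps : pvPos bases k with
    | nil => rfl
    | cons p0 rest =>
      have hnn : ∀ p ∈ p0 :: rest, 0 ≤ p := by rw [← hps]; exact pvPos_nonneg bases k
      have hnd : (p0 :: rest).Nodup := by rw [← hps]; exact pvPos_nodup bases k
      rw [hps] at hnot
      show ((PySem.List.enumerate rest 2).foldl
        (fun r q => PySem.List.pySetD r q.2 (k ++ "__" ++ PySem.Int.toStr q.1))
        (PySem.List.pySetD res p0 k))[i]? = res[i]?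
      rw [pvSetFold_getElem? k rest 2 _ i hnd.of_cons
        (fun p hp => hnn p (List.mem_cons_of_mem _ hp))]
      rw [(PySem.List.index?_eq_none_iff rest _).mpr
        (fun h => hnot (List.mem_cons_of_mem _ h))]
      exact pvSetD_getElem?_ne res p0 k i (hnn p0 List.mem_cons_self)
        (fun h => hnot (h ▸ List.mem_cons_self))

lemma pvFillFold_length : ∀ (items : List (String × List Int)) (res : List String),
    (items.foldl pvFill res).length = res.length := by
  intro items
  induction items with
  | nil => intro res; rfl
  | cons it items ih => intro res; rw [List.foldl_cons, ih, pvFill_length]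

lemma pvFillFold (bases : List String) (i : Nat) (b : String) (hib : bases[i]? = some b) :
    ∀ (ks : List String), ks.Nodup → ∀ (res : List String), i < res.length →
    ((ks.map (fun k => (k, pvPos bases k))).foldl pvFill res)[i]? =
      if b ∈ ks then some (pvName (bases.take i) b) else res[i]? := by
  intro ks
  induction ks with
  | nil => intro _ res _; simp
  | cons k ks ih =>
    intro hnd res hlen
    rw [List.map_cons, List.foldl_cons]
    have hlen' : i < (pvFill res (k, pvPos bases k)).length := by
      rw [pvFill_length]; exact hlen
    rw [ih hnd.of_cons _ hlen', pvFill_getElem? bases i b hib k res hlen]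
    by_cases hk : k = b
    · subst hk
      have hbk : k ∉ ks := (List.nodup_cons.mp hnd).1
      rw [if_neg hbk, if_pos rfl, if_pos List.mem_cons_self]
    · by_cases hbks : b ∈ ks
      · rw [if_pos hbks, if_pos (List.mem_cons_of_mem _ hbks)]
      · have hnm : b ∉ k :: ks := by
          simp only [List.mem_cons, not_or]
          exact ⟨fun h => hk h.symm, hbks⟩
        rw [if_neg hbks, if_neg hnm, if_neg hk]

-- ---------- assembling B ----------
lemma pvAlt_loop (bases : List String) :
    (pvBuckets bases).items.foldl pvFill (List.replicate bases.length "")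
      = pvBuild2 [] bases := by
  apply List.ext_getElem?
  intro i
  by_cases hi : i < bases.length
  · have hib : bases[i]? = some bases[i] := List.getElem?_eq_getElem hi
    rw [pvBuckets_items, pvFillFold bases i bases[i] hib (pvBuckets bases).keys
        (pvBuckets_keys_nodup bases) _ (by rw [List.length_replicate]; exact hi)]
    rw [if_pos ((pvBuckets_mem_keys bases bases[i]).mpr (List.getElem_mem hi))]
    rw [pvBuild2_getElem? bases [] i hi, hib]
    simp
  · rw [List.getElem?_eq_none, List.getElem?_eq_none]
    · rw [pvBuild2_length]; omega
    · rw [pvFillFold_length, List.length_replicate]; omega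

lemma pvB_eq (fs : List String) :
    make_unique_fieldnames_alt fs
      = pvBuild2 [] ((PySem.List.enumerate fs 0).map (fun p => pvClean p.2 p.1)) := by
  rw [show make_unique_fieldnames_alt fs
      = (pvBuckets ((PySem.List.enumerate fs 0).map (fun p => pvClean p.2 p.1))).items.foldl
          pvFill (List.replicate ((PySem.List.enumerate fs 0).map
            (fun p => pvClean p.2 p.1)).length "") from rfl]
  exact pvAlt_loop _

-- ===== VERDICT (by name: the statement is the Claim_ definition above) =====
theorem make_unique_fieldnames_spec : Claim_equal_make_unique_fieldnames := by
  intro fieldnames _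
  show make_unique_fieldnames fieldnames = make_unique_fieldnames_alt fieldnames
  rw [pvA_eq, pvB_eq, pvBuild_eq_build2, pvCleanList_eq]
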